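-- pv_equiv track=rewrite | github.com/fkulic/advent-of-code | 2024/day22.py | part_two
-- ===== SOURCE A (Python) =====
-- from collections import defaultdict
--
-- def get_next_price(n: int) -> int:
--     n ^= n * 64
--     n %= 16777216
--     n ^= n // 32
--     n %= 16777216
--     n ^= n * 2048
--     n %= 16777216
--     return n
--
-- def part_two(data: list[int]) -> int:
--     prices = defaultdict(list)
--     for i, next_price in enumerate(data):
--         last_4_diffs = []
--         last_digit = 0
--         for j in range(2000):
--             previous_last_digit = last_digit
--             next_price = get_next_price(next_price)
--             last_digit = next_price % 10
--             if j != 0: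
--                 last_4_diffs.append(last_digit - previous_last_digit)
--             if len(last_4_diffs) > 4:
--                 last_4_diffs = last_4_diffs[1:]
--             if len(last_4_diffs) > 3:
--                 prices[*last_4_diffs].append((i, last_digit))
--
--     total_prices = []
--     for _, values in prices.items():
--         seen = set()
--         total_bananas = 0
--         for i, digit in values:
--             if i in seen:
--                 continue
--             seen.add(i)
--             total_bananas += digit
--         total_prices.append(total_bananas)
--     return max(total_prices)
-- ===== SOURCE B (Python) =====
-- def get_next_price(n: int) -> int:
--     n ^= n * 64
--     n %= 16777216
--     n ^= n // 32
--     n %= 16777216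
--     n ^= n * 2048
--     n %= 16777216
--     return n
--
-- def part_two(data: list[int]) -> int:
--     totals = {}
--     for n in data:
--         digits = []
--         for _ in range(2000):
--             n = get_next_price(n)
--             digits.append(n % 10)
--         diffs = [b - a for a, b in zip(digits, digits[1:])]
--         firsts = {}
--         for key, digit in zip(zip(diffs, diffs[1:], diffs[2:], diffs[3:]), digits[4:]):
--             if key not in firsts:
--                 firsts[key] = digit
--         for key, digit in firsts.items():
--             totals[key] = totals.get(key, 0) + digit
--     return max(totals.values())
-- ===== Notes on version B (the rewrite author's own statement) =====
-- stated objective: simpler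
-- what changed: Instead of A's streaming sliding-window state plus a global dict of per-key (buyer,digit) event lists with a second dedup/aggregation pass, B materialises each buyer's 2000 digits, derives diffs and 4-windows by list zips, dedups first occurrences in a small per-buyer dict and accumulates totals directly, returning max(totals.values()).
-- outside the precondition, e.g. on part_two([]): A raises ValueError, B raises ValueError
import Mathlib
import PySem

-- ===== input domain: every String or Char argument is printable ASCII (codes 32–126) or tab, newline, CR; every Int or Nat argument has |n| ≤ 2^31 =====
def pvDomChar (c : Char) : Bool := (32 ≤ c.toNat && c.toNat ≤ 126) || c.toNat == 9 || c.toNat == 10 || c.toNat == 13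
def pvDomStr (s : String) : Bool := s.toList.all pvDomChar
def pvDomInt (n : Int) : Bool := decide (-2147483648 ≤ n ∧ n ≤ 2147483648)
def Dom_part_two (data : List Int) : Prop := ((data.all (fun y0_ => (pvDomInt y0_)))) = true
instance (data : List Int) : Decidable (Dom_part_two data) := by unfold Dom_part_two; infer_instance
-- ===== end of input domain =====

-- B differs from A by materialising each buyer's digit list and zipping windows with a per-buyer
-- first-occurrence dict accumulated straight into totals (no global event lists, no second pass);
-- the proved equivalence is about the return value on nonempty input (Python tuples keyed internally
-- are modelled as 4-element lists in both ports).

-- ===== PORT A =====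
def get_next_price (n : Int) : Int :=
  let n1 := PySem.Int.bxor n (n * 64)
  let n2 := PySem.Int.mod n1 16777216
  let n3 := PySem.Int.bxor n2 (PySem.Int.floordiv n2 32)
  let n4 := PySem.Int.mod n3 16777216
  let n5 := PySem.Int.bxor n4 (n4 * 2048)
  PySem.Int.mod n5 16777216

def part_two (data : List Int) : Int :=
  let prices : PySem.Dict (List Int) (List (Int × Int)) :=
    (PySem.List.enumerate data).foldl (fun prices inp =>
      ((PySem.List.pyRange 0 2000 1).foldl
        (fun (st : List Int × Int × Int × PySem.Dict (List Int) (List (Int × Int))) j =>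
          let prev := st.2.1
          let np := get_next_price st.2.2.1
          let ld := PySem.Int.mod np 10
          let l4a := if j ≠ 0 then st.1 ++ [ld - prev] else st.1
          let l4 := if l4a.length > 4 then PySem.List.slice l4a (some 1) none else l4a
          let pr := if l4.length > 3 then st.2.2.2.modify l4 [] (· ++ [(inp.1, ld)]) else st.2.2.2
          (l4, ld, np, pr))
        (([] : List Int), (0 : Int), inp.2, prices)).2.2.2)
      PySem.Dict.empty
  let total_prices : List Int := prices.items.foldl (fun tp kv =>
      tp ++ [(kv.2.foldl (fun (sb : PySem.Set Int × Int) p =>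
          if PySem.Set.contains sb.1 p.1 then sb else (PySem.Set.add sb.1 p.1, sb.2 + p.2))
        ((PySem.Set.empty : PySem.Set Int), (0 : Int))).2]) []
  (PySem.List.max? total_prices (fun x => x)).getD 0

-- ===== PORT B =====
def part_two_alt (data : List Int) : Int :=
  let totals : PySem.Dict (List Int) Int :=
    data.foldl (fun totals n0 =>
      let dn := (PySem.List.pyRange 0 2000 1).foldl
          (fun (dn : List Int × Int) _ =>
            let n := get_next_price dn.2
            (dn.1 ++ [PySem.Int.mod n 10], n)) (([] : List Int), n0)
      let digits := dn.1
      let diffs := (digits.zip (PySem.List.slice digits (some 1) none)).map (fun p => p.2 - p.1)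
      -- zip(diffs, diffs[1:], diffs[2:], diffs[3:]) modelled with nested binary zips
      -- (same truncation rule and the same 4 components, packed as a 4-element list key)
      let windows := ((diffs.zip (PySem.List.slice diffs (some 1) none)).zip
                      ((PySem.List.slice diffs (some 2) none).zip (PySem.List.slice diffs (some 3) none))).map
                      (fun p => [p.1.1, p.1.2, p.2.1, p.2.2])
      let firsts : PySem.Dict (List Int) Int :=
        (windows.zip (PySem.List.slice digits (some 4) none)).foldl
          (fun f kd => if f.contains kd.1 then f else f.insert kd.1 kd.2) PySem.Dict.empty
      firsts.items.foldl (fun t kd => t.insert kd.1 (t.getD kd.1 0 + kd.2)) totals)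
      PySem.Dict.empty
  (PySem.List.max? totals.values (fun x => x)).getD 0

-- ===== PRECONDITION & SPEC =====
-- Python A raises ValueError (max of an empty sequence) on data = []; B raises there too.
def Pre_part_two (data : List Int) : Prop := data ≠ []
instance (data : List Int) : Decidable (Pre_part_two data) := by unfold Pre_part_two; infer_instance
def pvWitness_part_two : List Int := [1]
def Spec_part_two (data : List Int) (out : Int) : Prop := out = part_two_alt data
instance (data : List Int) (out : Int) : Decidable (Spec_part_two data out) := by unfold Spec_part_two; infer_instance

-- ===== CLAIM (what is proved, stated in full; the proofs are below) =====
def Claim_equal_part_two : Prop := ∀ (data : List Int), Dom_part_two data → Pre_part_two data → Spec_part_two data (part_two data)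

-- ===== LEMMAS AND PROOFS =====

-- the k-th secret number and the digit / diff streams of one buyer
def prc (n : Int) : Nat → Int
  | 0 => n
  | k + 1 => get_next_price (prc n k)

def dg (n : Int) (t : Nat) : Int := PySem.Int.mod (prc n (t + 1)) 10
def df (n : Int) (t : Nat) : Int := dg n (t + 1) - dg n t
def dgs (n : Int) (m : Nat) : List Int := (List.range m).map (dg n)
def dfs (n : Int) (m : Nat) : List Int := (List.range (m - 1)).map (df n)
def wkey (n : Int) (t : Nat) : List Int := [df n t, df n (t + 1), df n (t + 2), df n (t + 3)]
-- the (window, digit) events of one buyer after m iterations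
def evs (n : Int) (m : Nat) : List (List Int × Int) :=
  (List.range (m - 4)).map (fun t => (wkey n t, dg n (t + 4)))
-- the digit B's firsts dict credits key k for buyer n (0 when the window never occurs)
def hD (n : Int) (k : List Int) : Int :=
  (((evs n 2000).filter (fun p => p.1 == k)).map (·.2)).headD 0

theorem dgs_succ (n : Int) (m : Nat) : dgs n (m + 1) = dgs n m ++ [dg n m] := by
  simp [dgs, List.range_succ]

theorem dfs_succ (n : Int) (m : Nat) (h : 1 ≤ m) :
    dfs n (m + 1) = dfs n m ++ [df n (m - 1)] := by
  have h1 : m + 1 - 1 = (m - 1) + 1 := by omega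
  simp [dfs, h1, List.range_succ]

theorem evs_succ (n : Int) (m : Nat) (h : 4 ≤ m) :
    evs n (m + 1) = evs n m ++ [(wkey n (m - 4), dg n m)] := by
  have h1 : m + 1 - 4 = (m - 4) + 1 := by omega
  have h2 : m - 4 + 4 = m := by omega
  simp [evs, h1, List.range_succ, h2]

theorem evs_succ_low (n : Int) (m : Nat) (h : m < 4) : evs n (m + 1) = evs n m := by
  have h1 : m + 1 - 4 = 0 := by omega
  have h2 : m - 4 = 0 := by omega
  simp [evs, h1, h2]

theorem length_dfs (n : Int) (m : Nat) : (dfs n m).length = m - 1 := by simp [dfs]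

theorem dfs_drop_wkey (n : Int) (m : Nat) (h : 4 ≤ m) :
    (dfs n (m + 1)).drop (m - 4) = wkey n (m - 4) := by
  have h1 : m + 1 - 1 = m := by omega
  rw [dfs, h1, ← List.map_drop, List.range_eq_range', List.drop_range']
  have h2 : m - (m - 4) = 4 := by omega
  rw [h2]
  simp only [Nat.zero_add, Nat.mul_one]
  have h3 : List.range' (m - 4) 4 = [m - 4, m - 4 + 1, m - 4 + 1 + 1, m - 4 + 1 + 1 + 1] := rfl
  rw [h3]
  simp only [List.map, wkey]

theorem A_inner (ip : Int × Int) (n : Int) (pr : PySem.Dict (List Int) (List (Int × Int)))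
    (m : Nat) :
    (PySem.List.pyRange 0 (m : Int) 1).foldl
      (fun (st : List Int × Int × Int × PySem.Dict (List Int) (List (Int × Int))) j =>
        let prev := st.2.1
        let np := get_next_price st.2.2.1
        let ld := PySem.Int.mod np 10
        let l4a := if j ≠ 0 then st.1 ++ [ld - prev] else st.1
        let l4 := if l4a.length > 4 then PySem.List.slice l4a (some 1) none else l4a
        let pr := if l4.length > 3 then st.2.2.2.modify l4 [] (· ++ [(ip.1, ld)]) else st.2.2.2
        (l4, ld, np, pr))
      (([] : List Int), (0 : Int), n, pr)
    = ((dfs n m).drop (m - 1 - 4), (if m = 0 then 0 else dg n (m - 1)), prc n m,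
       (evs n m).foldl (fun d e => d.modify e.1 [] (· ++ [(ip.1, e.2)])) pr) := by
  induction m with
  | zero =>
    rw [PySem.List.pyRange_one_eq_nil (by norm_num)]
    simp [dfs, evs, prc]
  | succ m ih =>
    have hc : ((m + 1 : Nat) : Int) = (m : Int) + 1 := by push_cast; ring
    rw [hc, PySem.List.pyRange_one_succ_right (by positivity), List.foldl_append, ih]
    simp only [List.foldl_cons, List.foldl_nil]
    by_cases hm0 : m = 0
    · subst hm0
      simp [dfs, evs, prc, dg]
    · have hmn : (m : Int) ≠ 0 := by exact_mod_cast hm0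
      have hm1 : 1 ≤ m := by omega
      have hdf : dg n m - dg n (m - 1) = df n (m - 1) := by
        unfold df; rw [Nat.sub_add_cancel hm1]
      have hnp : get_next_price (prc n m) = prc n (m + 1) := rfl
      have hld : PySem.Int.mod (prc n (m + 1)) 10 = dg n m := rfl
      simp only [hmn, ne_eq, not_false_eq_true, if_true, hnp, hld]
      rw [if_neg hm0, hdf]
      by_cases hm5 : 5 ≤ m
      · -- window full: append then trim
        have hlen4 : ((dfs n m).drop (m - 1 - 4)).length = 4 := by
          simp [length_dfs]; omega
        have hne : (dfs n m).drop (m - 1 - 4) ≠ [] := by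
          intro h; rw [h] at hlen4; simp at hlen4
        have hlena : ((dfs n m).drop (m - 1 - 4) ++ [df n (m - 1)]).length = 5 := by
          simp [hlen4]
        have htrim : PySem.List.slice ((dfs n m).drop (m - 1 - 4) ++ [df n (m - 1)]) (some 1) none
            = (dfs n (m + 1)).drop (m + 1 - 1 - 4) := by
          rw [PySem.List.slice_from_one, List.tail_append_of_ne_nil hne, List.tail_drop,
            dfs_succ n m hm1]
          have h1 : m - 1 - 4 + 1 = m - 4 := by omega
          have h2 : m + 1 - 1 - 4 = m - 4 := by omega
          rw [h1, h2, List.drop_append_of_le_length (by rw [length_dfs]; omega)]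
        have hkey : (dfs n (m + 1)).drop (m + 1 - 1 - 4) = wkey n (m - 4) := by
          have h2 : m + 1 - 1 - 4 = m - 4 := by omega
          rw [h2, dfs_drop_wkey n m (by omega)]
        have hkl : ((dfs n (m + 1)).drop (m + 1 - 1 - 4)).length = 4 := by
          rw [hkey]; rfl
        rw [hlena, if_pos (show 5 > 4 by norm_num), htrim, hkl,
          if_pos (show 4 > 3 by norm_num), hkey,
          evs_succ n m (by omega), List.foldl_append]
        simp
      · -- 1 ≤ m ≤ 4: no trim
        have hfull : (dfs n m).drop (m - 1 - 4) ++ [df n (m - 1)] = dfs n (m + 1) := by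
          have h0 : m - 1 - 4 = 0 := by omega
          rw [h0, List.drop_zero, dfs_succ n m hm1]
        rw [hfull, length_dfs, if_neg (by omega)]
        by_cases hm4 : m = 4
        · subst hm4
          rw [length_dfs, if_pos (by norm_num)]
          have hkey : dfs n 5 = wkey n 0 := by
            have := dfs_drop_wkey n 4 (by norm_num)
            simpa using this
          rw [hkey, evs_succ n 4 (by norm_num), List.foldl_append]
          simp
        · rw [length_dfs, if_neg (by omega), evs_succ_low n m (by omega)]
          have h2 : m - 4 = 0 := by omega
          have h0 : m - 1 - 4 = 0 := by omega
          rw [← hfull]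
          simp [h2, h0]

theorem B_digits (n : Int) (m : Nat) :
    (PySem.List.pyRange 0 (m : Int) 1).foldl
      (fun (dn : List Int × Int) _ =>
        let n := get_next_price dn.2
        (dn.1 ++ [PySem.Int.mod n 10], n)) (([] : List Int), n)
    = (dgs n m, prc n m) := by
  induction m with
  | zero =>
    rw [PySem.List.pyRange_one_eq_nil (by norm_num)]
    simp [dgs, prc]
  | succ m ih =>
    have hc : ((m + 1 : Nat) : Int) = (m : Int) + 1 := by push_cast; ring
    rw [hc, PySem.List.pyRange_one_succ_right (by positivity), List.foldl_append, ih]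
    simp only [List.foldl_cons, List.foldl_nil]
    rw [dgs_succ]
    rfl

theorem diffs_eq (n : Int) (m : Nat) :
    ((dgs n m).zip (PySem.List.slice (dgs n m) (some 1) none)).map (fun p => p.2 - p.1)
    = dfs n m := by
  rw [PySem.List.slice_from_one]
  apply List.ext_getElem
  · simp [dgs, dfs]
  · intro i h1 h2
    simp only [List.getElem_map, List.getElem_zip, List.getElem_tail, dgs, dfs,
      List.getElem_range, df]

theorem evsB (n : Int) (m : Nat) :
    (((((dfs n m).zip (PySem.List.slice (dfs n m) (some 1) none)).zip
        ((PySem.List.slice (dfs n m) (some 2) none).zip (PySem.List.slice (dfs n m) (some 3) none))).map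
        (fun p => [p.1.1, p.1.2, p.2.1, p.2.2])).zip
      (PySem.List.slice (dgs n m) (some 4) none))
    = evs n m := by
  rw [PySem.List.slice_from_one,
    show ((2 : Int)) = ((2 : Nat) : Int) by norm_num,
    show ((3 : Int)) = ((3 : Nat) : Int) by norm_num,
    show ((4 : Int)) = ((4 : Nat) : Int) by norm_num,
    PySem.List.slice_from_natCast, PySem.List.slice_from_natCast, PySem.List.slice_from_natCast]
  apply List.ext_getElem
  · simp [dgs, dfs, evs]; omega
  · intro i h1 h2
    simp only [List.getElem_zip, List.getElem_map, List.getElem_tail, List.getElem_drop,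
      dfs, dgs, evs, List.getElem_range, wkey]
    rw [Nat.add_comm 2 i, Nat.add_comm 3 i, Nat.add_comm 4 i]

-- ---- small Set facts used below ----
theorem set_add_of_mem {α : Type} [BEq α] [LawfulBEq α] (s : PySem.Set α) (x : α) (h : x ∈ s) :
    PySem.Set.add s x = s := by
  simp [PySem.Set.add, PySem.Set.contains, h]

theorem set_add_of_not_mem {α : Type} [BEq α] [LawfulBEq α] (s : PySem.Set α) (x : α)
    (h : ¬ x ∈ s) : PySem.Set.add s x = s ++ [x] := by
  simp [PySem.Set.add, PySem.Set.contains, h]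

theorem set_update_add {α : Type} [BEq α] [LawfulBEq α] (s u : PySem.Set α) (x : α) :
    PySem.Set.update s (PySem.Set.add u x) = PySem.Set.add (PySem.Set.update s u) x := by
  by_cases h : x ∈ u
  · rw [set_add_of_mem u x h, set_add_of_mem _ x (by rw [PySem.Set.mem_update]; exact Or.inr h)]
  · rw [set_add_of_not_mem u x h]
    simp [PySem.Set.update, List.foldl_append]

theorem set_update_update {α : Type} [BEq α] [LawfulBEq α] (l : List α) :
    ∀ (s u : PySem.Set α),
      PySem.Set.update s (PySem.Set.update u l) = PySem.Set.update (PySem.Set.update s u) l := by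
  induction l with
  | nil => intro s u; rfl
  | cons x t ih =>
    intro s u
    show PySem.Set.update s (PySem.Set.update (PySem.Set.add u x) t) = _
    rw [ih s (PySem.Set.add u x), set_update_add]
    rfl

theorem set_update_ofList {α : Type} [BEq α] [LawfulBEq α] (s : PySem.Set α) (l : List α) :
    PySem.Set.update s (PySem.Set.ofList l) = PySem.Set.update s l := by
  have h : PySem.Set.ofList l = PySem.Set.update ([] : PySem.Set α) l := rfl
  rw [h, set_update_update]
  rfl

-- ---- B's first-occurrence dict ----
theorem condInsert_get? (l : List (List Int × Int)) :
    ∀ (d : PySem.Dict (List Int) Int) (k : List Int),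
      (l.foldl (fun f kd => if f.contains kd.1 then f else f.insert kd.1 kd.2) d).get? k
      = (d.get? k).or ((l.filter (fun p => p.1 == k)).map (·.2)).head? := by
  induction l with
  | nil => intro d k; simp
  | cons kd t ih =>
    intro d k
    rw [List.foldl_cons]
    by_cases hc : d.contains kd.1 = true
    · rw [if_pos hc, ih]
      by_cases hk : kd.1 = k
      · subst hk
        have : ∃ v, d.get? kd.1 = some v := by
          rw [PySem.Dict.contains_eq_isSome_get?] at hc
          exact Option.isSome_iff_exists.mp hc
        obtain ⟨v, hv⟩ := this
        simp [hv]
      · simp [show (kd.1 == k) = false by simp [hk]]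
    · rw [if_neg hc, ih]
      by_cases hk : kd.1 = k
      · subst hk
        have hnone : d.get? kd.1 = none := by
          rw [PySem.Dict.contains_eq_isSome_get?] at hc
          simpa using hc
        simp [PySem.Dict.get?_insert_self, hnone]
      · rw [PySem.Dict.get?_insert_of_ne _ _ (fun h => hk h.symm)]
        simp [show (kd.1 == k) = false by simp [hk]]

theorem condInsert_keys (l : List (List Int × Int)) :
    ∀ (d : PySem.Dict (List Int) Int),
      (l.foldl (fun f kd => if f.contains kd.1 then f else f.insert kd.1 kd.2) d).keys
      = PySem.Set.update d.keys (l.map (·.1)) := by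
  induction l with
  | nil => intro d; rfl
  | cons kd t ih =>
    intro d
    rw [List.foldl_cons, List.map_cons]
    show _ = PySem.Set.update (PySem.Set.add d.keys kd.1) (t.map (·.1))
    by_cases hc : d.contains kd.1 = true
    · rw [if_pos hc, ih, set_add_of_mem _ _ ((PySem.Dict.contains_iff_mem_keys d kd.1).mp hc)]
    · rw [if_neg hc, ih, PySem.Dict.keys_insert_of_not_contains _ _ (by simpa using hc),
        set_add_of_not_mem _ _ (fun h => hc ((PySem.Dict.contains_iff_mem_keys d kd.1).mpr h))]

theorem condInsert_nodup (l : List (List Int × Int)) :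
    ∀ (d : PySem.Dict (List Int) Int), d.keys.Nodup →
      (l.foldl (fun f kd => if f.contains kd.1 then f else f.insert kd.1 kd.2) d).keys.Nodup := by
  induction l with
  | nil => intro d h; exact h
  | cons kd t ih =>
    intro d h
    rw [List.foldl_cons]
    by_cases hc : d.contains kd.1 = true
    · rw [if_pos hc]; exact ih d h
    · rw [if_neg hc]; exact ih _ (PySem.Dict.nodup_keys_insert _ _ _ h)

-- ---- B's totals accumulation ----
theorem addfold_getD (l : List (List Int × Int)) :
    ∀ (t : PySem.Dict (List Int) Int) (k : List Int),
      (l.foldl (fun t kd => t.insert kd.1 (t.getD kd.1 0 + kd.2)) t).getD k 0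
      = t.getD k 0 + ((l.filter (fun p => p.1 == k)).map (·.2)).sum := by
  induction l with
  | nil => intro t k; simp
  | cons kd r ih =>
    intro t k
    rw [List.foldl_cons, ih]
    by_cases hk : kd.1 = k
    · subst hk
      rw [PySem.Dict.getD_insert_self]
      simp [add_assoc]
    · rw [PySem.Dict.getD_insert_of_ne _ _ _ (fun h => hk h.symm)]
      simp [show (kd.1 == k) = false by simp [hk]]

-- ---- sum of a filtered keyed map over distinct keys ----
theorem sum_filter_map (K : List (List Int)) (g : List Int → Int) (k : List Int)
    (hnd : K.Nodup) :
    (((K.map (fun k' => (k', g k'))).filter (fun p => p.1 == k)).map (·.2)).sum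
    = if k ∈ K then g k else 0 := by
  induction K with
  | nil => simp
  | cons a t ih =>
    rw [List.nodup_cons] at hnd
    by_cases ha : a = k
    · subst ha
      have hk : ¬ a ∈ t := hnd.1
      have hz : ((t.map (fun k' => (k', g k'))).filter (fun p => p.1 == a)) = [] := by
        rw [List.filter_eq_nil_iff]
        intro p hp
        simp only [List.mem_map] at hp
        obtain ⟨k', hk', rfl⟩ := hp
        simp only [beq_iff_eq]
        rintro rfl
        exact hk hk'
      simp [hz]
    · have hf : (a == k) = false := by simp [ha]
      simp only [List.map_cons, List.filter_cons, hf, Bool.false_eq_true, if_false]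
      rw [ih hnd.2]
      simp [List.mem_cons, show ¬ k = a from fun h => ha h.symm]

-- ---- A's per-key seen-set dedup fold ----
theorem mem_add_self {α : Type} [BEq α] [LawfulBEq α] (s : PySem.Set α) (x : α) :
    x ∈ PySem.Set.add s x := (PySem.Set.mem_add s x x).mpr (Or.inr rfl)

theorem skip_all (i : Int) (ds : List Int) :
    ∀ (st : PySem.Set Int × Int), i ∈ st.1 →
      (ds.map (fun d => (i, d))).foldl
        (fun (sb : PySem.Set Int × Int) p =>
          if PySem.Set.contains sb.1 p.1 then sb else (PySem.Set.add sb.1 p.1, sb.2 + p.2)) st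
      = st := by
  induction ds with
  | nil => intro st _; rfl
  | cons d t ih =>
    intro st h
    rw [List.map_cons, List.foldl_cons, if_pos ((PySem.Set.contains_iff st.1 i).mpr h)]
    exact ih st h

theorem one_block (i : Int) (ds : List Int) (seen : PySem.Set Int) (acc : Int)
    (h : ¬ i ∈ seen) :
    (ds.map (fun d => (i, d))).foldl
      (fun (sb : PySem.Set Int × Int) p =>
        if PySem.Set.contains sb.1 p.1 then sb else (PySem.Set.add sb.1 p.1, sb.2 + p.2))
      (seen, acc)
    = (if ds = [] then seen else PySem.Set.add seen i, acc + ds.headD 0) := by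
  cases ds with
  | nil => simp
  | cons d t =>
    rw [List.map_cons, List.foldl_cons,
      if_neg (fun hc => h ((PySem.Set.contains_iff seen i).mp hc))]
    rw [skip_all i t _ (mem_add_self seen i)]
    simp

theorem blocks_sum (bs : List (Int × List Int)) :
    ∀ (seen : PySem.Set Int) (acc : Int),
      (∀ i ∈ bs.map Prod.fst, ¬ i ∈ seen) → (bs.map Prod.fst).Nodup →
      ((bs.flatMap (fun b => b.2.map (fun d => (b.1, d)))).foldl
          (fun (sb : PySem.Set Int × Int) p =>
            if PySem.Set.contains sb.1 p.1 then sb else (PySem.Set.add sb.1 p.1, sb.2 + p.2))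
          (seen, acc)).2
        = acc + (bs.map (fun b => b.2.headD 0)).sum
      ∧ ∀ x ∈ ((bs.flatMap (fun b => b.2.map (fun d => (b.1, d)))).foldl
          (fun (sb : PySem.Set Int × Int) p =>
            if PySem.Set.contains sb.1 p.1 then sb else (PySem.Set.add sb.1 p.1, sb.2 + p.2))
          (seen, acc)).1, x ∈ seen ∨ x ∈ bs.map Prod.fst := by
  induction bs with
  | nil => intro seen acc _ _; simp
  | cons b t ih =>
    intro seen acc hs hn
    rw [List.flatMap_cons, List.foldl_append, one_block b.1 b.2 seen acc
      (hs b.1 (by simp))]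
    have hseen : ∀ y, y ∈ (if b.2 = [] then seen else PySem.Set.add seen b.1) →
        y ∈ seen ∨ y = b.1 := by
      intro y hy
      split_ifs at hy with hb
      · exact Or.inl hy
      · exact (PySem.Set.mem_add seen b.1 y).mp hy
    rw [List.map_cons, List.nodup_cons] at hn
    have hs' : ∀ i ∈ t.map Prod.fst, ¬ i ∈ (if b.2 = [] then seen else PySem.Set.add seen b.1) := by
      intro i hi hmem
      rcases hseen i hmem with h | h
      · exact hs i (by simp [hi]) h
      · exact hn.1 (h ▸ hi)
    obtain ⟨h1, h2⟩ := ih _ (acc + b.2.headD 0) hs' hn.2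
    refine ⟨by rw [h1]; simp [add_assoc], ?_⟩
    intro x hx
    rcases h2 x hx with h | h
    · rcases hseen x h with h' | h'
      · exact Or.inl h'
      · exact Or.inr (by simp [h'])
    · exact Or.inr (by simp [h])

-- ---- B's buyer step in terms of the event stream ----
def firstsOf (n : Int) : PySem.Dict (List Int) Int :=
  (evs n 2000).foldl (fun f kd => if f.contains kd.1 then f else f.insert kd.1 kd.2)
    PySem.Dict.empty

theorem B_step (t : PySem.Dict (List Int) Int) (n0 : Int) :
    (let dn := (PySem.List.pyRange 0 2000 1).foldl
        (fun (dn : List Int × Int) _ =>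
          let n := get_next_price dn.2
          (dn.1 ++ [PySem.Int.mod n 10], n)) (([] : List Int), n0)
     let digits := dn.1
     let diffs := (digits.zip (PySem.List.slice digits (some 1) none)).map (fun p => p.2 - p.1)
     let windows := ((diffs.zip (PySem.List.slice diffs (some 1) none)).zip
                     ((PySem.List.slice diffs (some 2) none).zip (PySem.List.slice diffs (some 3) none))).map
                     (fun p => [p.1.1, p.1.2, p.2.1, p.2.2])
     let firsts : PySem.Dict (List Int) Int :=
       (windows.zip (PySem.List.slice digits (some 4) none)).foldl
         (fun f kd => if f.contains kd.1 then f else f.insert kd.1 kd.2) PySem.Dict.empty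
     firsts.items.foldl (fun t kd => t.insert kd.1 (t.getD kd.1 0 + kd.2)) t)
    = (firstsOf n0).items.foldl (fun t kd => t.insert kd.1 (t.getD kd.1 0 + kd.2)) t := by
  rw [show (2000 : Int) = ((2000 : Nat) : Int) by norm_num]
  simp only [B_digits, diffs_eq, evsB, firstsOf]

theorem firsts_getD (n : Int) (k : List Int) : (firstsOf n).getD k 0 = hD n k := by
  rw [PySem.Dict.getD_eq_get?_getD, firstsOf, condInsert_get? _ PySem.Dict.empty k]
  simp only [PySem.Dict.get?_empty, Option.none_or, hD]
  cases ((evs n 2000).filter (fun p => p.1 == k)).map (·.2) with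
  | nil => simp
  | cons a t => simp

theorem firsts_keys (n : Int) :
    (firstsOf n).keys = PySem.Set.ofList ((evs n 2000).map (·.1)) := by
  rw [firstsOf, condInsert_keys]
  rfl

theorem firsts_nodup (n : Int) : (firstsOf n).keys.Nodup := by
  exact condInsert_nodup _ _ (by simp [PySem.Dict.keys_empty])

theorem hD_zero_of_not_mem (n : Int) (k : List Int)
    (h : ¬ k ∈ (evs n 2000).map (·.1)) : hD n k = 0 := by
  have hz : (evs n 2000).filter (fun p => p.1 == k) = [] := by
    rw [List.filter_eq_nil_iff]
    intro p hp
    simp only [beq_iff_eq]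
    rintro rfl
    exact h (List.mem_map.mpr ⟨p, hp, rfl⟩)
  simp [hD, hz]

theorem set_update_append {α : Type} [BEq α] (s : PySem.Set α) (l1 l2 : List α) :
    PySem.Set.update s (l1 ++ l2) = PySem.Set.update (PySem.Set.update s l1) l2 := by
  simp [PySem.Set.update, List.foldl_append]

theorem B_totals (ds : List Int) :
    ∀ (t0 : PySem.Dict (List Int) Int), t0.keys.Nodup →
      ((ds.foldl (fun t n0 => (firstsOf n0).items.foldl
          (fun t kd => t.insert kd.1 (t.getD kd.1 0 + kd.2)) t) t0).keys
        = PySem.Set.update t0.keys (ds.flatMap (fun n => (evs n 2000).map (·.1))))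
      ∧ (ds.foldl (fun t n0 => (firstsOf n0).items.foldl
          (fun t kd => t.insert kd.1 (t.getD kd.1 0 + kd.2)) t) t0).keys.Nodup
      ∧ ∀ k, (ds.foldl (fun t n0 => (firstsOf n0).items.foldl
          (fun t kd => t.insert kd.1 (t.getD kd.1 0 + kd.2)) t) t0).getD k 0
          = t0.getD k 0 + (ds.map (fun n => hD n k)).sum := by
  induction ds with
  | nil => intro t0 h; refine ⟨rfl, h, fun k => by simp⟩
  | cons n0 r ih =>
    intro t0 h
    rw [List.foldl_cons]
    set d1 := (firstsOf n0).items.foldl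
      (fun t kd => t.insert kd.1 (t.getD kd.1 0 + kd.2)) t0 with hd1
    have hk1 : d1.keys = PySem.Set.update t0.keys ((evs n0 2000).map (·.1)) := by
      rw [hd1, PySem.Dict.keys_foldl_insert_key (l := (firstsOf n0).items)
        (key := fun kd => kd.1) (f := fun t kd => t.getD kd.1 0 + kd.2) (d := t0)]
      have hm : (firstsOf n0).items.map (fun kd => kd.1) = (firstsOf n0).keys := rfl
      rw [hm, firsts_keys, set_update_ofList]
    have hn1 : d1.keys.Nodup := by
      rw [hd1]
      exact PySem.Dict.nodup_keys_foldl_insert_key (l := (firstsOf n0).items)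
        (key := fun kd => kd.1) (f := fun t kd => t.getD kd.1 0 + kd.2) (d := t0) h
    have hg1 : ∀ k, d1.getD k 0 = t0.getD k 0 + hD n0 k := by
      intro k
      rw [hd1, addfold_getD,
        PySem.Dict.items_eq_map_keys (firstsOf n0) (firsts_nodup n0) 0,
        sum_filter_map _ _ _ (firsts_nodup n0)]
      by_cases hmem : k ∈ (firstsOf n0).keys
      · rw [if_pos hmem, firsts_getD]
      · rw [if_neg hmem, hD_zero_of_not_mem n0 k]
        intro hc
        exact hmem (by rw [firsts_keys]; exact (PySem.Set.mem_ofList _ _).mpr hc)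
    obtain ⟨k2, n2, g2⟩ := ih d1 hn1
    refine ⟨?_, n2, ?_⟩
    · rw [k2, hk1, List.flatMap_cons, set_update_append]
    · intro k
      rw [g2 k, hg1 k, List.map_cons, List.sum_cons, add_assoc]

-- ---- flattened event list of A and the common key list ----
def allEv (data : List Int) : List (List Int × (Int × Int)) :=
  (PySem.List.enumerate data).flatMap
    (fun ip => (evs ip.2 2000).map (fun e => (e.1, (ip.1, e.2))))

def keyList (data : List Int) : List (List Int) :=
  data.flatMap (fun n => (evs n 2000).map (fun e => e.1))

theorem enum_flatMap {γ : Type} (F : Int → List γ) (data : List Int) :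
    (PySem.List.enumerate data).flatMap (fun ip => F ip.2) = data.flatMap F := by
  conv_rhs => rw [← PySem.List.map_snd_enumerate data 0, List.flatMap_map]

theorem enum_map {γ : Type} (F : Int → γ) (data : List Int) :
    (PySem.List.enumerate data).map (fun ip => F ip.2) = data.map F := by
  conv_rhs => rw [← PySem.List.map_snd_enumerate data 0, List.map_map]
  exact List.map_congr_left (fun a _ => rfl)

set_option maxRecDepth 100000 in
theorem allEv_keys (data : List Int) :
    (allEv data).map (fun p => p.1) = keyList data := by
  rw [allEv, List.map_flatMap, keyList,
    ← enum_flatMap (fun n => (evs n 2000).map (fun e => e.1)) data]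
  simp only [List.map_map]
  rfl

set_option maxRecDepth 100000 in
theorem dedup_value (data : List Int) (k : List Int) :
    ((((allEv data).filter (fun p => p.1 == k)).map (fun p => p.2)).foldl
      (fun (sb : PySem.Set Int × Int) p =>
        if PySem.Set.contains sb.1 p.1 then sb else (PySem.Set.add sb.1 p.1, sb.2 + p.2))
      ((PySem.Set.empty : PySem.Set Int), (0 : Int))).2
    = (data.map (fun n => hD n k)).sum := by
  have hnodup : (((PySem.List.enumerate data).map
      (fun ip => (ip.1, ((evs ip.2 2000).filter (fun e => e.1 == k)).map (fun e => e.2)))).map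
        Prod.fst).Nodup := by
    have h : ((PySem.List.enumerate data).map
        (fun ip => (ip.1, ((evs ip.2 2000).filter (fun e => e.1 == k)).map (fun e => e.2)))).map
          Prod.fst = (PySem.List.enumerate data).map (fun x => x.1) := by
      rw [List.map_map]; rfl
    rw [h, PySem.List.map_fst_enumerate]
    exact PySem.List.nodup_pyRange_one _ _
  obtain ⟨h1, _⟩ := blocks_sum ((PySem.List.enumerate data).map
      (fun ip => (ip.1, ((evs ip.2 2000).filter (fun e => e.1 == k)).map (fun e => e.2))))
      PySem.Set.empty 0 (fun i _ h => absurd h List.not_mem_nil) hnodup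
  have hlist : ((allEv data).filter (fun p => p.1 == k)).map (fun p => p.2)
      = ((PySem.List.enumerate data).map
          (fun ip => (ip.1, ((evs ip.2 2000).filter (fun e => e.1 == k)).map (fun e => e.2)))).flatMap
          (fun b => b.2.map (fun d => (b.1, d))) := by
    rw [allEv, List.filter_flatMap, List.map_flatMap, List.flatMap_map]
    simp only [List.filter_map, List.map_map]
    rfl
  rw [hlist, h1]
  have hsum : (((PySem.List.enumerate data).map
      (fun ip => (ip.1, ((evs ip.2 2000).filter (fun e => e.1 == k)).map (fun e => e.2)))).map
        (fun b => b.2.headD 0)) = data.map (fun n => hD n k) := by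
    rw [List.map_map, ← enum_map (fun n => hD n k) data]
    rfl
  rw [hsum, zero_add]

set_option maxRecDepth 100000 in
theorem B_eq (data : List Int) :
    part_two_alt data =
    (PySem.List.max? ((PySem.Set.ofList (keyList data)).map
        (fun k => (data.map (fun n => hD n k)).sum)) (fun x => x)).getD 0 := by
  unfold part_two_alt
  have hfun : (fun (totals : PySem.Dict (List Int) Int) (n0 : Int) =>
      let dn := (PySem.List.pyRange 0 2000 1).foldl
          (fun (dn : List Int × Int) _ =>
            let n := get_next_price dn.2
            (dn.1 ++ [PySem.Int.mod n 10], n)) (([] : List Int), n0)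
      let digits := dn.1
      let diffs := (digits.zip (PySem.List.slice digits (some 1) none)).map (fun p => p.2 - p.1)
      let windows := ((diffs.zip (PySem.List.slice diffs (some 1) none)).zip
                      ((PySem.List.slice diffs (some 2) none).zip (PySem.List.slice diffs (some 3) none))).map
                      (fun p => [p.1.1, p.1.2, p.2.1, p.2.2])
      let firsts : PySem.Dict (List Int) Int :=
        (windows.zip (PySem.List.slice digits (some 4) none)).foldl
          (fun f kd => if f.contains kd.1 then f else f.insert kd.1 kd.2) PySem.Dict.empty
      firsts.items.foldl (fun t kd => t.insert kd.1 (t.getD kd.1 0 + kd.2)) totals)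
      = (fun t n0 => (firstsOf n0).items.foldl
          (fun t kd => t.insert kd.1 (t.getD kd.1 0 + kd.2)) t) :=
    funext (fun t => funext (fun n0 => B_step t n0))
  rw [hfun]
  show (PySem.List.max? ((data.foldl (fun t n0 => (firstsOf n0).items.foldl
      (fun t kd => t.insert kd.1 (t.getD kd.1 0 + kd.2)) t) PySem.Dict.empty)).values
      (fun x => x)).getD 0 = _
  obtain ⟨hk, hn, hg⟩ := B_totals data PySem.Dict.empty (by
    rw [PySem.Dict.keys_empty]; exact List.nodup_nil)
  rw [PySem.Dict.values_eq_map_keys _ hn 0, hk, PySem.Dict.keys_empty]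
  have hkl : PySem.Set.update ([] : PySem.Set (List Int))
      (data.flatMap (fun n => (evs n 2000).map (·.1))) = PySem.Set.ofList (keyList data) := rfl
  rw [hkl]
  congr 2
  refine List.map_congr_left (fun k _ => ?_)
  rw [hg k, PySem.Dict.getD_empty, zero_add]

set_option maxRecDepth 100000 in
theorem A_eq (data : List Int) :
    part_two data =
    (PySem.List.max? ((PySem.Set.ofList (keyList data)).map
        (fun k => (data.map (fun n => hD n k)).sum)) (fun x => x)).getD 0 := by
  simp only [part_two]
  rw [PySem.List.foldl_congr_mem (PySem.List.enumerate data) _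
    (fun prices ip => (evs ip.2 2000).foldl
      (fun d e => d.modify e.1 [] (· ++ [(ip.1, e.2)])) prices)
    PySem.Dict.empty
    (fun acc x _ => by
      rw [show (2000 : Int) = ((2000 : Nat) : Int) by norm_num, A_inner x x.2 acc 2000])]
  have hflat : (PySem.List.enumerate data).foldl
      (fun prices ip => (evs ip.2 2000).foldl
        (fun d e => d.modify e.1 [] (· ++ [(ip.1, e.2)])) prices) PySem.Dict.empty
      = (allEv data).foldl (fun d p => d.modify p.1 [] (· ++ [p.2])) PySem.Dict.empty := by
    rw [allEv, List.foldl_flatMap]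
    exact PySem.List.foldl_congr_mem _ _ _ _
      (fun acc x _ => by rw [List.foldl_map])
  rw [hflat]
  have hnodup : ((allEv data).foldl
      (fun d p => d.modify p.1 [] (· ++ [p.2])) PySem.Dict.empty).keys.Nodup := by
    exact PySem.Dict.nodup_keys_foldl_modify_key (l := allEv data) (key := fun p => p.1)
      (d0 := []) (f := fun d p v => v ++ [p.2]) (d := PySem.Dict.empty)
      (by rw [PySem.Dict.keys_empty]; exact List.nodup_nil)
  rw [PySem.List.foldl_append_singleton_eq_map
    (fun kv : List Int × List (Int × Int) => (kv.2.foldl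
      (fun (sb : PySem.Set Int × Int) p =>
        if PySem.Set.contains sb.1 p.1 then sb else (PySem.Set.add sb.1 p.1, sb.2 + p.2))
      ((PySem.Set.empty : PySem.Set Int), (0 : Int))).2)]
  rw [PySem.Dict.items_eq_map_keys _ hnodup [], List.nil_append, List.map_map]
  have hkeys : ((allEv data).foldl
      (fun d p => d.modify p.1 [] (· ++ [p.2])) PySem.Dict.empty).keys
      = PySem.Set.ofList (keyList data) := by
    rw [PySem.Dict.keys_foldl_modify_key (l := allEv data) (key := fun p => p.1)
      (d0 := []) (f := fun d p v => v ++ [p.2]) (d := PySem.Dict.empty),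
      PySem.Dict.keys_empty, allEv_keys]
    rfl
  rw [hkeys]
  congr 2
  refine List.map_congr_left (fun k _ => ?_)
  show ((((allEv data).foldl (fun d p => d.modify p.1 [] (· ++ [p.2]))
      PySem.Dict.empty).getD k []).foldl
      (fun (sb : PySem.Set Int × Int) p =>
        if PySem.Set.contains sb.1 p.1 then sb else (PySem.Set.add sb.1 p.1, sb.2 + p.2))
      ((PySem.Set.empty : PySem.Set Int), (0 : Int))).2 = _
  rw [PySem.Dict.getD_foldl_modify_append, PySem.Dict.getD_empty, List.nil_append]
  exact dedup_value data k

theorem part_two_spec : Claim_equal_part_two := by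
  intro data _ _
  unfold Spec_part_two
  exact (A_eq data).trans (B_eq data).symm
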